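-- pv_equiv track=rewrite | github.com/vthakore23/healthcare-stock-analyzer | pages/3_💊_Clinical_Pipeline.py | calculate_pipeline_score
-- ===== SOURCE A (Python) =====
-- def calculate_pipeline_score(pipeline: list) -> int:
--     """Calculate pipeline value score"""
--     phase_values = {
--         'Preclinical': 1, 'Phase I': 2, 'Phase II': 4,
--         'Phase III': 8, 'Approved/Commercial': 15
--     }
--
--     total_score = 0
--     for item in pipeline:
--         if isinstance(item, dict) and 'phase' in item:
--             phase = item['phase']
--             total_score += phase_values.get(phase, 1)
--
--     return total_score
-- ===== SOURCE B (Python) =====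
-- def calculate_pipeline_score(pipeline: list) -> int:
--     """Calculate pipeline value score (baseline-plus-bonus formulation)"""
--     phases = [item['phase'] for item in pipeline
--               if isinstance(item, dict) and 'phase' in item]
--     score = len(phases)  # every valid item contributes at least 1
--     for phase, value in [('Preclinical', 1), ('Phase I', 2), ('Phase II', 4),
--                          ('Phase III', 8), ('Approved/Commercial', 15)]:
--         score += (value - 1) * phases.count(phase)
--     return score
-- ===== Notes on version B (the rewrite author's own statement) =====
-- stated objective: alternative
-- what changed: Replaces the per-item dict lookup with a baseline-plus-bonus computation: extract the phase list, start from its length (the default weight 1 per valid item), then add (weight-1)*count(phase) for each of the five known phases; no dict lookup remains.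
import Mathlib
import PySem

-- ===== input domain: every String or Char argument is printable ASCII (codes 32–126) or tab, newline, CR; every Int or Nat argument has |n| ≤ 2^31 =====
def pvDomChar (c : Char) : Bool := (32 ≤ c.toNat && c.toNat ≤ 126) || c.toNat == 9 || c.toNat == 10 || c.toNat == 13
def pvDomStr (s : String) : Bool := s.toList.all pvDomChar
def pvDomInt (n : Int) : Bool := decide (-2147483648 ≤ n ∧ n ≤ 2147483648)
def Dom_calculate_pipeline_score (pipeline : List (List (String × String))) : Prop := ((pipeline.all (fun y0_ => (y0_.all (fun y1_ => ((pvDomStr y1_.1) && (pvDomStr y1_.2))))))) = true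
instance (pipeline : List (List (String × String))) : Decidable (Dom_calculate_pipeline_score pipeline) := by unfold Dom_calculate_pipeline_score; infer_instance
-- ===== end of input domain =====

-- B replaces the per-item dict lookup with a baseline-plus-bonus computation over the extracted phase list (objective: alternative).

-- ===== PORT A =====
-- Transliteration of A: one pass, accumulate phase_values.get(item['phase'], 1)
-- (every item is a dict under the type convention, so the isinstance test is always true;
--  'phase' in item / item['phase'] are the first-match lookup List.lookup).
def calculate_pipeline_score (pipeline : List (List (String × String))) : Int :=
  let phase_values : PySem.Dict String Int := PySem.Dict.ofList
    [("Preclinical", 1), ("Phase I", 2), ("Phase II", 4), ("Phase III", 8), ("Approved/Commercial", 15)]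
  pipeline.foldl (fun total_score item =>
    match item.lookup "phase" with
    | some phase => total_score + phase_values.getD phase 1
    | none => total_score) 0

-- ===== PORT B =====
-- Transliteration of B: extract the phase list, start from its length (default weight 1 per
-- valid item), then loop over the five (phase, value) pairs adding (value-1)*phases.count(phase).
def calculate_pipeline_score_alt (pipeline : List (List (String × String))) : Int :=
  let phases := pipeline.filterMap (fun item => item.lookup "phase")
  let score : Int := phases.length
  ([("Preclinical", (1 : Int)), ("Phase I", 2), ("Phase II", 4),
    ("Phase III", 8), ("Approved/Commercial", 15)]).foldl
    (fun score pv => score + (pv.2 - 1) * (PySem.List.count phases pv.1 : Int)) score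

-- ===== PRECONDITION & SPEC =====
def Spec_calculate_pipeline_score (pipeline : List (List (String × String))) (out : Int) : Prop := out = calculate_pipeline_score_alt pipeline
instance (pipeline : List (List (String × String))) (out : Int) : Decidable (Spec_calculate_pipeline_score pipeline out) := by unfold Spec_calculate_pipeline_score; infer_instance

-- ===== CLAIM (what is proved, stated in full; the proofs are below) =====
def Claim_equal_calculate_pipeline_score : Prop := ∀ (pipeline : List (List (String × String))), Dom_calculate_pipeline_score pipeline → Spec_calculate_pipeline_score pipeline (calculate_pipeline_score pipeline)

-- ===== LEMMAS AND PROOFS =====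

-- A's fold equals the plain sum of weights over the extracted phases.
theorem foldA_eq_sum (w : PySem.Dict String Int) (l : List (List (String × String))) (acc : Int) :
    l.foldl (fun t item => match item.lookup "phase" with
      | some phase => t + w.getD phase 1
      | none => t) acc
    = acc + ((l.filterMap (fun item => item.lookup "phase")).map (fun p => w.getD p 1)).sum := by
  induction l generalizing acc with
  | nil => simp
  | cons x xs ih =>
    cases h : x.lookup "phase" with
    | none => simp [List.foldl_cons, h, ih]
    | some phase => simp [List.foldl_cons, h, ih]; ring

-- The plain weight sum equals length + the per-known-phase bonuses.
theorem sum_weights_eq_baseline (l : List String) :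
    ((l.map (fun p => (PySem.Dict.ofList
        [("Preclinical", (1:Int)), ("Phase I", 2), ("Phase II", 4), ("Phase III", 8),
         ("Approved/Commercial", 15)]).getD p 1)).sum)
    = (l.length : Int)
      + (2 - 1) * (l.count "Phase I" : Int) + (4 - 1) * (l.count "Phase II" : Int)
      + (8 - 1) * (l.count "Phase III" : Int) + (15 - 1) * (l.count "Approved/Commercial" : Int) := by
  induction l with
  | nil => simp
  | cons k t ih =>
    simp only [List.map_cons, List.sum_cons, ih, List.length_cons]
    by_cases h1 : k = "Phase I"
    · subst h1
      rw [show (PySem.Dict.ofList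
        [("Preclinical", (1:Int)), ("Phase I", 2), ("Phase II", 4), ("Phase III", 8),
         ("Approved/Commercial", 15)]).getD "Phase I" 1 = 2 from by decide]
      simp; ring
    by_cases h2 : k = "Phase II"
    · subst h2
      rw [show (PySem.Dict.ofList
        [("Preclinical", (1:Int)), ("Phase I", 2), ("Phase II", 4), ("Phase III", 8),
         ("Approved/Commercial", 15)]).getD "Phase II" 1 = 4 from by decide]
      simp; ring
    by_cases h3 : k = "Phase III"
    · subst h3
      rw [show (PySem.Dict.ofList
        [("Preclinical", (1:Int)), ("Phase I", 2), ("Phase II", 4), ("Phase III", 8),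
         ("Approved/Commercial", 15)]).getD "Phase III" 1 = 8 from by decide]
      simp; ring
    by_cases h4 : k = "Approved/Commercial"
    · subst h4
      rw [show (PySem.Dict.ofList
        [("Preclinical", (1:Int)), ("Phase I", 2), ("Phase II", 4), ("Phase III", 8),
         ("Approved/Commercial", 15)]).getD "Approved/Commercial" 1 = 15 from by decide]
      simp; ring
    by_cases h5 : k = "Preclinical"
    · subst h5
      rw [show (PySem.Dict.ofList
        [("Preclinical", (1:Int)), ("Phase I", 2), ("Phase II", 4), ("Phase III", 8),
         ("Approved/Commercial", 15)]).getD "Preclinical" 1 = 1 from by decide]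
      simp; ring
    · rw [show (PySem.Dict.ofList
        [("Preclinical", (1:Int)), ("Phase I", 2), ("Phase II", 4), ("Phase III", 8),
         ("Approved/Commercial", 15)]).getD k 1 = 1 from by
          simp [PySem.Dict.ofList, PySem.Dict.update, PySem.Dict.getD_insert, h1, h2, h3, h4, h5]]
      simp [h1, h2, h3, h4]; ring

-- ===== VERDICT (by name: the statement is the Claim_ definition above) =====
theorem calculate_pipeline_score_spec : Claim_equal_calculate_pipeline_score := by
  intro pipeline _
  simp only [Spec_calculate_pipeline_score, calculate_pipeline_score, calculate_pipeline_score_alt]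
  rw [foldA_eq_sum, sum_weights_eq_baseline]
  simp only [List.foldl_cons, List.foldl_nil, PySem.List.count_eq]
  ring
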